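-- pv_equiv track=rewrite | github.com/Mr-Harsh-Dixit/Project_Euler_Solutions | Python/Problem_106.py | needed_tests
-- ===== SOURCE A (Python) =====
-- from math import comb
--
-- def catalan(k: int) -> int:
--     return comb(2*k, k) // (k + 1)
--
-- def needed_tests(n: int) -> int:
--     total = 0
--     for k in range(2, n//2 + 1):
--         ways_pick = comb(n, 2*k)
--         splits = comb(2*k, k)
--         noncross = catalan(k)
--         need = (splits - 2*noncross) // 2
--         total += ways_pick * need
--     return total
-- ===== SOURCE B (Python) =====
-- def needed_tests(n: int) -> int:
--     # Incremental version: maintain C(n,2k), C(2k,k) and Catalan(k) by exact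
--     # multiplicative recurrences instead of recomputing binomials each step.
--     m = n // 2
--     if m < 2:
--         return 0
--     cnk = n * (n - 1) * (n - 2) * (n - 3) // 24   # C(n, 4)
--     cbk = 6                                        # C(4, 2)
--     cat = 2                                        # Catalan(2)
--     total = 0
--     for k in range(2, m + 1):
--         total += cnk * ((cbk - 2 * cat) // 2)
--         cnk = cnk * (n - 2 * k) * (n - 2 * k - 1) // ((2 * k + 1) * (2 * k + 2))
--         cat = cat * 2 * (2 * k + 1) // (k + 2)
--         cbk = cbk * 2 * (2 * k + 1) // (k + 1)
--     return total
-- ===== Notes on version B (the rewrite author's own statement) =====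
-- stated objective: faster
-- what changed: B replaces the per-iteration comb() recomputations by running values of C(n,2k), C(2k,k) and Catalan(k) updated with exact multiplicative recurrences, with an early return for n < 4.
import Mathlib
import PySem

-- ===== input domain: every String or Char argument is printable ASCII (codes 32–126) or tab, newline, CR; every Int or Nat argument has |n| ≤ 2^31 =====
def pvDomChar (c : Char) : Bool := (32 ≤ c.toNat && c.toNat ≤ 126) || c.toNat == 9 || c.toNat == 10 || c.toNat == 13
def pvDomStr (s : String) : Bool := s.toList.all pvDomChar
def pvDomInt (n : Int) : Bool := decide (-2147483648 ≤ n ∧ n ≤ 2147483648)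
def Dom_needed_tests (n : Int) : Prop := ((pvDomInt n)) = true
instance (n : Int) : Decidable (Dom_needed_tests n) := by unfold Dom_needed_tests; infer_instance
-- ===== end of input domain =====

-- B maintains the three binomial quantities incrementally by exact multiplicative recurrences instead of recomputing comb() each step; intended as faster (timing run measured ~39-50x at n=1024).

-- ===== PORT A =====
-- math.comb; exact for nonnegative arguments, the only ones reached by A's loop
def pyComb (a b : Int) : Int := (a.toNat.choose b.toNat : Int)

def catalanA (k : Int) : Int := PySem.Int.floordiv (pyComb (2*k) k) (k + 1)

def aBody (n : Int) (total : Int) (k : Int) : Int :=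
  let ways_pick := pyComb n (2*k)
  let splits := pyComb (2*k) k
  let noncross := catalanA k
  let need := PySem.Int.floordiv (splits - 2*noncross) 2
  total + ways_pick * need

def needed_tests (n : Int) : Int :=
  (PySem.List.pyRange 2 (PySem.Int.floordiv n 2 + 1) 1).foldl (aBody n) 0

-- ===== PORT B =====
-- state: (total, C(n,2k), C(2k,k), Catalan(k))
def bStep (n : Int) (s : Int × Int × Int × Int) (k : Int) : Int × Int × Int × Int :=
  let (total, cnk, cbk, cat) := s
  (total + cnk * PySem.Int.floordiv (cbk - 2*cat) 2,
   PySem.Int.floordiv (cnk * (n - 2*k) * (n - 2*k - 1)) ((2*k+1)*(2*k+2)),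
   PySem.Int.floordiv (cbk * 2 * (2*k+1)) (k+1),
   PySem.Int.floordiv (cat * 2 * (2*k+1)) (k+2))

def needed_tests_alt (n : Int) : Int :=
  let m := PySem.Int.floordiv n 2
  if m < 2 then 0
  else
    ((PySem.List.pyRange 2 (m+1) 1).foldl (bStep n)
      (0, PySem.Int.floordiv (n*(n-1)*(n-2)*(n-3)) 24, 6, 2)).1

-- ===== PRECONDITION & SPEC =====
def Spec_needed_tests (n : Int) (out : Int) : Prop := out = needed_tests_alt n
instance (n : Int) (out : Int) : Decidable (Spec_needed_tests n out) := by unfold Spec_needed_tests; infer_instance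

-- ===== CLAIM (what is proved, stated in full; the proofs are below) =====
def Claim_equal_needed_tests : Prop := ∀ (n : Int), Dom_needed_tests n → Spec_needed_tests n (needed_tests n)

-- ===== LEMMAS AND PROOFS =====

lemma floordiv_exact (a b q : Int) (hb : 0 < b) (h : a = q * b) :
    PySem.Int.floordiv a b = q := by
  subst h
  rw [PySem.Int.floordiv_eq_iff_of_pos hb]
  refine ⟨le_rfl, ?_⟩
  nlinarith

lemma pyComb_cast (a b : Nat) : pyComb (a : Int) (b : Int) = (a.choose b : Int) := by
  simp [pyComb]

lemma chooseNat4 (N : Nat) : N.choose 4 * 24 = N * (N-1) * (N-2) * (N-3) := by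
  have h3 := Nat.choose_succ_right_eq N 3
  have h2 := Nat.choose_succ_right_eq N 2
  have h1 := Nat.choose_succ_right_eq N 1
  calc N.choose 4 * 24 = (N.choose 4 * 4) * 6 := by ring
    _ = N.choose 3 * (N-3) * 6 := by rw [h3]
    _ = (N.choose 3 * 3) * 2 * (N-3) := by ring
    _ = N.choose 2 * (N-2) * 2 * (N-3) := by rw [h2]
    _ = (N.choose 2 * 2) * ((N-2) * (N-3)) := by ring
    _ = N.choose 1 * (N-1) * ((N-2) * (N-3)) := by rw [h1]
    _ = N * (N-1) * (N-2) * (N-3) := by rw [Nat.choose_one_right]; ring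

lemma seed_eq (N : Nat) (hge : 4 ≤ N) :
    PySem.Int.floordiv ((N:Int) * ((N:Int)-1) * ((N:Int)-2) * ((N:Int)-3)) 24
      = (N.choose 4 : Int) := by
  apply floordiv_exact _ _ _ (by norm_num)
  have := chooseNat4 N
  have hc : ((N.choose 4 * 24 : Nat) : Int)
      = (N:Int) * ((N:Int)-1) * ((N:Int)-2) * ((N:Int)-3) := by
    rw [this]
    push_cast [Nat.cast_sub (show 1 ≤ N by omega), Nat.cast_sub (show 2 ≤ N by omega),
      Nat.cast_sub (show 3 ≤ N by omega)]
    ring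
  rw [← hc]; push_cast; ring

lemma cnk_rec (N j : Nat) (_h : 2*j ≤ N) :
    N.choose (2*j) * (N - 2*j) * (N - 2*j - 1)
      = N.choose (2*j+2) * ((2*j+1)*(2*j+2)) := by
  have h1 := Nat.choose_succ_right_eq N (2*j)
  have h2 := Nat.choose_succ_right_eq N (2*j+1)
  have hs : N - (2*j+1) = N - 2*j - 1 := by omega
  calc N.choose (2*j) * (N - 2*j) * (N - 2*j - 1)
      = (N.choose (2*j+1) * (2*j+1)) * (N - 2*j - 1) := by rw [h1]
    _ = (N.choose (2*j+1) * (N - (2*j+1))) * (2*j+1) := by rw [hs]; ring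
    _ = (N.choose (2*j+2) * (2*j+2)) * (2*j+1) := by rw [h2]
    _ = N.choose (2*j+2) * ((2*j+1)*(2*j+2)) := by ring

lemma cnk_rec_int (N j : Nat) (h : 2*j ≤ N) :
    (N.choose (2*j) : Int) * ((N:Int) - 2*(j:Int)) * ((N:Int) - 2*(j:Int) - 1)
      = (N.choose (2*j+2) : Int) * ((2*(j:Int)+1)*(2*(j:Int)+2)) := by
  rcases eq_or_lt_of_le h with heq | hlt
  · have hz : (N:Int) - 2*(j:Int) = 0 := by omega
    have hc : N.choose (2*j+2) = 0 := Nat.choose_eq_zero_of_lt (by omega)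
    rw [hc, hz]; push_cast; ring
  · have hc := cnk_rec N j h
    have e1 : (N:Int) - 2*(j:Int) = ((N - 2*j : Nat) : Int) := by
      push_cast [Nat.cast_sub (by omega : 2*j ≤ N)]; ring
    have e2 : (N:Int) - 2*(j:Int) - 1 = ((N - 2*j - 1 : Nat) : Int) := by
      push_cast [Nat.cast_sub (by omega : 2*j ≤ N), Nat.cast_sub (by omega : 1 ≤ N - 2*j)]
      ring
    rw [e2, e1]
    exact_mod_cast hc

lemma cat_rec (j : Nat) : 2*(2*j+1) * catalan j = (j+2) * catalan (j+1) := by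
  have h1 := Nat.succ_mul_centralBinom_succ j
  have h2 := succ_mul_catalan_eq_centralBinom j
  have h3 := succ_mul_catalan_eq_centralBinom (j+1)
  apply Nat.eq_of_mul_eq_mul_left (show 0 < j + 1 by omega)
  calc (j+1) * (2*(2*j+1) * catalan j) = 2*(2*j+1) * ((j+1) * catalan j) := by ring
    _ = 2*(2*j+1) * Nat.centralBinom j := by rw [h2]
    _ = (j+1) * Nat.centralBinom (j+1) := h1.symm
    _ = (j+1) * ((j+1+1) * catalan (j+1)) := by rw [h3]
    _ = (j+1) * ((j+2) * catalan (j+1)) := by ring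

lemma noncross_eq (j : Nat) :
    PySem.Int.floordiv (((2*j).choose j : Nat) : Int) ((j:Int)+1) = (catalan j : Int) := by
  rw [← Nat.centralBinom_eq_two_mul_choose]
  apply floordiv_exact _ _ _ (by positivity)
  have := succ_mul_catalan_eq_centralBinom j
  have h2 : ((Nat.centralBinom j : Nat) : Int) = (((j+1) * catalan j : Nat) : Int) := by
    exact_mod_cast this.symm
  rw [h2]; push_cast; ring

lemma cbk_step (j : Nat) :
    PySem.Int.floordiv ((Nat.centralBinom j : Int) * 2 * (2*(j:Int)+1)) ((j:Int)+1)
      = (Nat.centralBinom (j+1) : Int) := by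
  apply floordiv_exact _ _ _ (by positivity)
  have h1 := Nat.succ_mul_centralBinom_succ j
  have : ((2 * (2*j+1) * Nat.centralBinom j : Nat) : Int)
      = (((j+1) * Nat.centralBinom (j+1) : Nat) : Int) := by exact_mod_cast h1.symm
  push_cast at this
  linarith [this]

lemma cat_step (j : Nat) :
    PySem.Int.floordiv ((catalan j : Int) * 2 * (2*(j:Int)+1)) ((j:Int)+2)
      = (catalan (j+1) : Int) := by
  apply floordiv_exact _ _ _ (by positivity)
  have h := cat_rec j
  have : ((2*(2*j+1) * catalan j : Nat) : Int) = (((j+2) * catalan (j+1) : Nat) : Int) := by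
    exact_mod_cast h
  push_cast at this
  linarith [this]

lemma two_cast (j : Nat) : 2*((j:Nat):Int) = ((2*j : Nat) : Int) := by push_cast; ring

lemma aTerm_eq (N j : Nat) (total : Int) :
    aBody (N:Int) total (j:Int)
      = total + (N.choose (2*j) : Int) *
          PySem.Int.floordiv ((Nat.centralBinom j : Int) - 2*(catalan j : Int)) 2 := by
  simp only [aBody, catalanA]
  rw [two_cast, pyComb_cast, pyComb_cast, noncross_eq, Nat.centralBinom_eq_two_mul_choose]

lemma invariant (N : Nat) (_hN : 4 ≤ N) (t : Nat) (ht : 2 + t ≤ N/2 + 1) :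
    (PySem.List.pyRange 2 (2 + (t:Int)) 1).foldl (bStep (N:Int))
        (0, (N.choose 4 : Int), 6, 2)
      = ((PySem.List.pyRange 2 (2 + (t:Int)) 1).foldl (aBody (N:Int)) 0,
         (N.choose (2*(2+t)) : Int), (Nat.centralBinom (2+t) : Int), (catalan (2+t) : Int)) := by
  induction t with
  | zero =>
      rw [show (2 + ((0:Nat):Int)) = 2 by norm_num, PySem.List.pyRange_one_eq_nil le_rfl]
      simp [Nat.centralBinom, catalan_two]
      decide
  | succ t ih =>
      have ht' : 2 + t ≤ N/2 + 1 := by omega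
      have hjN : 2*(2+t) ≤ N := by omega
      have hrange : PySem.List.pyRange 2 (2 + ((t+1 : Nat):Int)) 1
          = PySem.List.pyRange 2 (2 + (t:Int)) 1 ++ [(2 + (t:Int))] := by
        have : (2 + ((t+1 : Nat):Int)) = (2 + (t:Int)) + 1 := by push_cast; ring
        rw [this, PySem.List.pyRange_one_succ_right (by omega)]
      rw [hrange, List.foldl_append, List.foldl_append, ih ht']
      have hj : (2 + (t:Int)) = ((2+t : Nat) : Int) := by push_cast; ring
      simp only [List.foldl_cons, List.foldl_nil]
      rw [hj]
      unfold bStep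
      simp only
      refine Prod.ext ?_ (Prod.ext ?_ (Prod.ext ?_ ?_))
      · simp only
        rw [aTerm_eq N (2+t)]
      · simp only
        have hrec := cnk_rec_int N (2+t) hjN
        rw [show 2*(2+(t+1)) = 2*(2+t)+2 from by omega]
        exact floordiv_exact _ _ _ (by positivity) hrec
      · simp only
        rw [cbk_step (2+t)]
        rfl
      · simp only
        rw [cat_step (2+t)]
        rfl

-- ===== VERDICT (by name: the statement is the Claim_ definition above) =====
theorem needed_tests_spec : Claim_equal_needed_tests := by
  intro n _
  unfold Spec_needed_tests needed_tests needed_tests_alt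
  by_cases hm : PySem.Int.floordiv n 2 < 2
  · simp only [hm, if_true]
    rw [PySem.List.pyRange_one_eq_nil (by omega)]
    rfl
  · simp only [hm, if_false]
    push_neg at hm
    have hn4 : 4 ≤ n := by
      have := (PySem.Int.le_floordiv_iff_mul_le (a := n) (b := 2) (q := 2) (by norm_num)).mp hm
      omega
    obtain ⟨N, rfl⟩ : ∃ N : Nat, n = (N:Int) := ⟨n.toNat, by omega⟩
    have hN : 4 ≤ N := by exact_mod_cast hn4
    have hfd : PySem.Int.floordiv (N:Int) 2 = ((N/2 : Nat) : Int) := by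
      exact_mod_cast PySem.Int.floordiv_natCast N 2
    set t : Nat := N/2 - 1 with htdef
    have h2t : PySem.Int.floordiv (N:Int) 2 + 1 = 2 + (t:Int) := by
      rw [hfd]; have : 2 ≤ N/2 := by omega
      push_cast; omega
    rw [h2t]
    rw [seed_eq N hN]
    rw [invariant N hN t (by omega)]
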